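-- pv_equiv track=rewrite | github.com/kamal3235/practice_code | anagram_evaluation.py | anagram_eval
-- ===== SOURCE A (Python) =====
-- def anagram_eval(s):
--     if len(s) % 2 != 0:
--         return -1
--     else:
--         sub1 = list(s[len(s)//2:])
--         for i in s[:len(s)//2]:
--             if i in sub1:
--                 sub1.remove(i)
--         return len(sub1)
-- ===== SOURCE B (Python) =====
-- def anagram_eval(s):
--     if len(s) % 2 != 0:
--         return -1
--     h = len(s) // 2
--     a = sorted(s[:h])
--     b = sorted(s[h:])
--     i = j = unmatched = 0
--     while i < len(a) and j < len(b):
--         if a[i] == b[j]: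
--             i += 1
--             j += 1
--         elif a[i] < b[j]:
--             i += 1
--         else:
--             j += 1
--             unmatched += 1
--     return unmatched + (len(b) - j)
-- ===== Notes on version B (the rewrite author's own statement) =====
-- stated objective: alternative
-- what changed: Replaced the membership-test-and-remove loop over a shrinking list with sorting both halves and a two-pointer merge walk that counts unmatched second-half characters.
import Mathlib
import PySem

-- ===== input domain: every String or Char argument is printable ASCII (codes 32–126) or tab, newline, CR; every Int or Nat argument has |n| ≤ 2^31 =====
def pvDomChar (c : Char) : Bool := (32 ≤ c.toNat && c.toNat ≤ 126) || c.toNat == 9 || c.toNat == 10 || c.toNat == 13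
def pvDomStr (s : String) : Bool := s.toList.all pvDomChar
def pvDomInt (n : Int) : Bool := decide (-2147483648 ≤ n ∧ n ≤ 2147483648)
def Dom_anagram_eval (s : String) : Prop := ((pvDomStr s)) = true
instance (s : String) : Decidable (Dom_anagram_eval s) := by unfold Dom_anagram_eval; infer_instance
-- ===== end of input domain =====

-- B replaces A's membership-test-and-remove loop over a shrinking list with
-- sort-both-halves + a two-pointer merge walk that counts unmatched second-half
-- characters (objective: alternative).


-- ===== PORT A =====
-- s[len//2:] / s[:len//2] with 0 ≤ len//2 ≤ len are exactly drop/take;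
-- 'i in sub1' is list membership; the guarded 'sub1.remove(i)' is List.erase (first occurrence).
def anagram_eval (s : String) : Int :=
  if s.toList.length % 2 ≠ 0 then -1
  else
    ((s.toList.take (s.toList.length / 2)).foldl
      (fun l i => if i ∈ l then l.erase i else l)
      (s.toList.drop (s.toList.length / 2))).length

-- ===== PORT B =====
-- The while loop with indices i, j into the two sorted lists is transcribed as the
-- obvious structural recursion on the two suffixes a[i:], b[j:]; 'unmatched + (len(b) - j)'
-- is the base case when a's suffix is exhausted.
def pvMergeCount (a b : List Char) : Int :=
  match a, b with
  | [], b => (b.length : Int)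
  | _ :: _, [] => 0
  | x :: a', y :: b' =>
    if x = y then pvMergeCount a' b'
    else if x < y then pvMergeCount a' (y :: b')
    else 1 + pvMergeCount (x :: a') b'

def anagram_eval_alt (s : String) : Int :=
  if s.toList.length % 2 ≠ 0 then -1
  else
    let a := PySem.List.sorted (s.toList.take (s.toList.length / 2)) (fun x => x) false
    let b := PySem.List.sorted (s.toList.drop (s.toList.length / 2)) (fun x => x) false
    pvMergeCount a b

-- ===== PRECONDITION & SPEC =====
def Spec_anagram_eval (s : String) (out : Int) : Prop := out = anagram_eval_alt s
instance (s : String) (out : Int) : Decidable (Spec_anagram_eval s out) := by unfold Spec_anagram_eval; infer_instance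

-- ===== CLAIM (what is proved, stated in full; the proofs are below) =====
def Claim_equal_anagram_eval : Prop := ∀ (s : String), Dom_anagram_eval s → Spec_anagram_eval s (anagram_eval s)

-- ===== LEMMAS AND PROOFS =====

-- A's loop is exactly List.diff (erasing a non-member is a no-op).
theorem pv_foldA_eq_diff (f l : List Char) :
    f.foldl (fun l i => if i ∈ l then l.erase i else l) l = l.diff f := by
  induction f generalizing l with
  | nil => simp [List.diff]
  | cons i f ih =>
    simp only [List.foldl_cons]
    by_cases h : i ∈ l
    · rw [if_pos h, ih, List.diff_cons]
    · rw [if_neg h, ih, List.diff_cons, List.erase_of_not_mem h]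

-- diff length via multisets: |l.diff f| = |l| − |↑f ⊓ ↑l|.
theorem pv_diff_length (f l : List Char) :
    ((l.diff f).length : Int) = (l.length : Int) - (((f : Multiset Char) ∩ (l : Multiset Char)).card : Int) := by
  have hcoe : ((l.diff f : List Char) : Multiset Char) = (l : Multiset Char) - (f : Multiset Char) :=
    (Multiset.coe_sub l f).symm
  have h1 : (l : Multiset Char) - (f : Multiset Char)
      = (l : Multiset Char) - ((l : Multiset Char) ∩ (f : Multiset Char)) :=
    (Multiset.sub_inter _ _).symm
  have hle : (l : Multiset Char) ∩ (f : Multiset Char) ≤ (l : Multiset Char) :=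
    Multiset.inter_le_left
  have hcard : ((l.diff f : List Char) : Multiset Char).card
      = (l : Multiset Char).card - ((l : Multiset Char) ∩ (f : Multiset Char)).card := by
    rw [hcoe, h1, Multiset.card_sub hle]
  have hN : (l.diff f).length = l.length - ((l : Multiset Char) ∩ (f : Multiset Char)).card := by
    rw [← Multiset.coe_card (l.diff f), hcard, Multiset.coe_card]
  have hcle : ((l : Multiset Char) ∩ (f : Multiset Char)).card ≤ l.length := by
    have := Multiset.card_le_card hle
    rwa [Multiset.coe_card] at this
  rw [Multiset.inter_comm]
  omega

-- The merge walk on sorted lists computes |b| − |↑a ⊓ ↑b|.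
theorem pv_mergeCount_spec (a b : List Char)
    (ha : a.Pairwise (· ≤ ·)) (hb : b.Pairwise (· ≤ ·)) :
    pvMergeCount a b = (b.length : Int) - (((a : Multiset Char) ∩ (b : Multiset Char)).card : Int) := by
  induction a, b using pvMergeCount.induct with
  | case1 b => simp [pvMergeCount]
  | case2 x a' => simp [pvMergeCount]
  | case3 a' y b' ih =>
    have hib : (y ::ₘ (a' : Multiset Char)) ∩ (y ::ₘ (b' : Multiset Char))
        = y ::ₘ ((a' : Multiset Char) ∩ (b' : Multiset Char)) := by
      rw [Multiset.cons_inter_of_pos _ (Multiset.mem_cons_self y _)]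
      simp
    rw [pvMergeCount]
    have ha' := (List.pairwise_cons.mp ha).2
    have hb' := (List.pairwise_cons.mp hb).2
    have := ih ha' hb'
    simp only [← Multiset.cons_coe] at hib ⊢
    rw [hib, Multiset.card_cons, this]
    simp only [List.length_cons]
    push_cast
    omega
  | case4 x a' y b' hne hlt ih =>
    -- x < y: x is below every element of y::b', so x ∉ (y::b')
    have hnot : x ∉ (y :: b') := by
      intro hmem
      have : y ≤ x := by
        rcases List.mem_cons.mp hmem with h | h
        · exact le_of_eq h.symm
        · exact le_trans (List.rel_of_pairwise_cons hb h) (le_refl x)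
      exact absurd hlt (not_lt.mpr this)
    have hi : ((x :: a' : List Char) : Multiset Char) ∩ ((y :: b' : List Char) : Multiset Char)
        = ((a' : List Char) : Multiset Char) ∩ ((y :: b' : List Char) : Multiset Char) := by
      simp only [← Multiset.cons_coe]
      exact Multiset.cons_inter_of_neg _ (by simpa using hnot)
    rw [pvMergeCount]
    simp only [if_neg hne, if_pos hlt]
    have ha' := (List.pairwise_cons.mp ha).2
    rw [ih ha' hb, ← hi]
  | case5 x a' y b' hne hnlt ih =>
    -- x > y: y is below every element of x::a', so y ∉ (x::a')
    have hyx : y < x := lt_of_le_of_ne (not_lt.mp hnlt) (fun h => hne h.symm)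
    have hnot : y ∉ (x :: a') := by
      intro hmem
      have : x ≤ y := by
        rcases List.mem_cons.mp hmem with h | h
        · exact le_of_eq h.symm
        · exact List.rel_of_pairwise_cons ha h
      exact absurd hyx (not_lt.mpr this)
    have hi : ((x :: a' : List Char) : Multiset Char) ∩ ((y :: b' : List Char) : Multiset Char)
        = ((x :: a' : List Char) : Multiset Char) ∩ ((b' : List Char) : Multiset Char) := by
      simp only [← Multiset.cons_coe]
      rw [Multiset.inter_comm, Multiset.cons_inter_of_neg _ (by simpa using hnot),
        Multiset.inter_comm]
    rw [pvMergeCount]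
    simp only [if_neg hne, if_neg hnlt]
    have hb' := (List.pairwise_cons.mp hb).2
    rw [ih ha hb', hi]
    simp only [← Multiset.cons_coe, List.length_cons]
    push_cast
    omega

theorem anagram_eval_eq_alt (s : String) : anagram_eval s = anagram_eval_alt s := by
  unfold anagram_eval anagram_eval_alt
  by_cases hpar : s.toList.length % 2 ≠ 0
  · rw [if_pos hpar, if_pos hpar]
  · rw [if_neg hpar, if_neg hpar]
    set f := s.toList.take (s.toList.length / 2) with hf
    set l := s.toList.drop (s.toList.length / 2) with hl
    have hsa : (PySem.List.sorted f (fun x => x) false).Pairwise (· ≤ ·) := by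
      simpa using PySem.List.sorted_pairwise f (fun x => x)
    have hsb : (PySem.List.sorted l (fun x => x) false).Pairwise (· ≤ ·) := by
      simpa using PySem.List.sorted_pairwise l (fun x => x)
    rw [pv_mergeCount_spec _ _ hsa hsb]
    have hpa : (PySem.List.sorted f (fun x => x) false).Perm f :=
      PySem.List.sorted_perm f (fun x => x) false
    have hpb : (PySem.List.sorted l (fun x => x) false).Perm l :=
      PySem.List.sorted_perm l (fun x => x) false
    have hma : ((PySem.List.sorted f (fun x => x) false : List Char) : Multiset Char) = (f : Multiset Char) :=
      Quot.sound hpa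
    have hmb : ((PySem.List.sorted l (fun x => x) false : List Char) : Multiset Char) = (l : Multiset Char) :=
      Quot.sound hpb
    rw [hma, hmb, hpb.length_eq, pv_foldA_eq_diff, pv_diff_length]

-- ===== VERDICT (by name: the statement is the Claim_ definition above) =====
theorem anagram_eval_spec : Claim_equal_anagram_eval := by
  intro s _
  unfold Spec_anagram_eval
  exact anagram_eval_eq_alt s
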